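-- pv_equiv track=rewrite | github.com/m0ksem/python-topic-1 | tests/python/tests/reversed.py | make_tetradic_numbers
-- ===== SOURCE A (Python) =====
-- def make_tetradic_number(index):
--   # Placeholder function, replace with actual implementation
--   return (index * (index + 1) * (index + 2)) // 6
--
-- def make_tetradic_numbers(num):
--   numbers = []
--   index = 0
--
--   while True:
--     tetradic_number = make_tetradic_number(index)
--     if tetradic_number > num:
--       break
--
--     numbers.append(tetradic_number)
--     index += 1
--
--   return numbers
-- ===== SOURCE B (Python) =====
-- def make_tetradic_numbers(num):
--     numbers = []
--     tetra = 0
--     tri = 0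
--     index = 0
--     while True:
--         if tetra > num:
--             break
--         numbers.append(tetra)
--         index += 1
--         tri += index
--         tetra += tri
--     return numbers
-- ===== Notes on version B (the rewrite author's own statement) =====
-- stated objective: alternative
-- what changed: B drops the closed-form cubic helper and generates each tetrahedral number incrementally from two running accumulators (triangular sum and tetrahedral sum), so no multiplication or division is performed per element.
import Mathlib
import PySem

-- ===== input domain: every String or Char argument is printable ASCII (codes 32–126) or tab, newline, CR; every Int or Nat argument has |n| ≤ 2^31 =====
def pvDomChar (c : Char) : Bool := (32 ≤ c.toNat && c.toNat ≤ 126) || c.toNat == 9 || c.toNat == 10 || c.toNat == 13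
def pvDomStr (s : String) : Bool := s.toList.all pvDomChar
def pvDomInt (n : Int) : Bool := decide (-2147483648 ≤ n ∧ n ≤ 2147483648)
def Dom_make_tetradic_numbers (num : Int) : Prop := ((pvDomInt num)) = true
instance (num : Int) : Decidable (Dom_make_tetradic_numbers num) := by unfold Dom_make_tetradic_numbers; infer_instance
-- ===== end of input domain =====

-- B replaces the per-index closed-form cubic formula by two additive running
-- accumulators (triangular and tetrahedral sums); same output, additions only.

-- ===== PORT A =====
def make_tetradic_number (index : Int) : Int :=
  PySem.Int.floordiv (index * (index + 1) * (index + 2)) 6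

-- used by both loops' termination: the i-th tetrahedral number is at least i
theorem pv_le_tetra (i : Nat) : (i : Int) ≤ make_tetradic_number i := by
  unfold make_tetradic_number
  have h6 : (0:Int) < 6 := by norm_num
  rw [PySem.Int.le_floordiv_iff_mul_le h6]
  have : (i : Int) * 6 ≤ (i : Int) * ((i + 1) * (i + 2)) := by
    rcases Nat.eq_zero_or_pos i with h | h
    · subst h; norm_num
    · have hi : (1:Int) ≤ (i:Int) := by exact_mod_cast h
      have h2 : (6:Int) ≤ ((i:Int) + 1) * ((i:Int) + 2) := by nlinarith
      nlinarith
  linarith [this]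

-- while-loop of A: index counter, recompute the closed form each iteration
def pvALoop (num : Int) (numbers : List Int) (index : Nat) : List Int :=
  let tetradic_number := make_tetradic_number index
  if tetradic_number > num then numbers
  else pvALoop num (numbers ++ [tetradic_number]) (index + 1)
termination_by (num + 1 - (index : Int)).toNat
decreasing_by
  have := pv_le_tetra index
  simp only [not_lt] at *
  omega

def make_tetradic_numbers (num : Int) : List Int :=
  pvALoop num [] 0

-- ===== PORT B =====
-- while-loop of B: tetra/tri accumulators; the proof arguments only serve termination
def pvBLoop (num tetra tri : Int) (index : Nat) (numbers : List Int)
    (h1 : (index : Int) ≤ tetra) (h2 : 0 ≤ tri) : List Int :=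
  if tetra > num then numbers
  else pvBLoop num (tetra + (tri + ((index : Int) + 1))) (tri + ((index : Int) + 1))
        (index + 1) (numbers ++ [tetra]) (by push_cast; omega) (by omega)
termination_by (num + 1 - (index : Int)).toNat
decreasing_by
  simp only [not_lt] at *
  omega

def make_tetradic_numbers_alt (num : Int) : List Int :=
  pvBLoop num 0 0 0 [] (by norm_num) (by norm_num)

-- ===== PRECONDITION & SPEC =====
def Spec_make_tetradic_numbers (num : Int) (out : List Int) : Prop := out = make_tetradic_numbers_alt num
instance (num : Int) (out : List Int) : Decidable (Spec_make_tetradic_numbers num out) := by unfold Spec_make_tetradic_numbers; infer_instance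

-- ===== CLAIM (what is proved, stated in full; the proofs are below) =====
def Claim_equal_make_tetradic_numbers : Prop := ∀ (num : Int), Dom_make_tetradic_numbers num → Spec_make_tetradic_numbers num (make_tetradic_numbers num)

-- ===== LEMMAS AND PROOFS =====

-- exact Nat closed forms for the two accumulators
def pvTri (i : Nat) : Nat := i * (i + 1) / 2
def pvTet (i : Nat) : Nat := i * (i + 1) * (i + 2) / 6

theorem pvTri_mul (i : Nat) : 2 * pvTri i = i * (i + 1) := by
  unfold pvTri
  have : 2 ∣ i * (i + 1) := (Nat.even_mul_succ_self i).two_dvd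
  omega

theorem pvTet_dvd (i : Nat) : 6 ∣ i * (i + 1) * (i + 2) := by
  induction i with
  | zero => simp
  | succ n ih =>
    obtain ⟨a, ha⟩ := ih
    obtain ⟨b, hb⟩ := Nat.even_mul_succ_self (n + 1)
    have hid : (n + 1) * (n + 1 + 1) * (n + 1 + 2) = n * (n + 1) * (n + 2) + 3 * ((n + 1) * (n + 1 + 1)) := by ring
    exact ⟨a + b, by omega⟩

theorem pvTet_mul (i : Nat) : 6 * pvTet i = i * (i + 1) * (i + 2) := by
  unfold pvTet
  have := pvTet_dvd i
  omega

theorem pvTri_succ (i : Nat) : pvTri (i + 1) = pvTri i + (i + 1) := by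
  have a := pvTri_mul i
  have b := pvTri_mul (i + 1)
  have hid : (i + 1) * (i + 1 + 1) = i * (i + 1) + 2 * (i + 1) := by ring
  omega

theorem pvTet_succ (i : Nat) : pvTet (i + 1) = pvTet i + pvTri (i + 1) := by
  have a := pvTet_mul i
  have b := pvTet_mul (i + 1)
  have c := pvTri_mul (i + 1)
  have hid : (i + 1) * (i + 1 + 1) * (i + 1 + 2) = i * (i + 1) * (i + 2) + 3 * ((i + 1) * (i + 1 + 1)) := by ring
  omega

-- bridge: A's closed-form helper at a Nat index computes pvTet
theorem pv_tetra_eq (i : Nat) : make_tetradic_number i = (pvTet i : Int) := by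
  unfold make_tetradic_number pvTet
  have : ((i : Int)) * ((i : Int) + 1) * ((i : Int) + 2) = ((i * (i + 1) * (i + 2) : Nat) : Int) := by
    push_cast; ring
  rw [this]
  exact_mod_cast PySem.Int.floordiv_natCast (i * (i + 1) * (i + 2)) 6

-- loop invariant: B's accumulators carry exactly pvTet/pvTri of the counter
theorem pv_loop_eq (num : Int) :
    ∀ (k i : Nat) (numbers : List Int) (h1 : (i : Int) ≤ ((pvTet i : Nat) : Int)) (h2 : (0:Int) ≤ ((pvTri i : Nat) : Int)),
      (num + 1 - (i : Int)).toNat ≤ k →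
      pvALoop num numbers i = pvBLoop num ((pvTet i : Nat) : Int) ((pvTri i : Nat) : Int) i numbers h1 h2 := by
  intro k
  induction k with
  | zero =>
    intro i numbers h1 h2 hk
    rw [pvALoop, pvBLoop, pv_tetra_eq]
    have hgt : ((pvTet i : Nat) : Int) > num := by omega
    simp [hgt]
  | succ n ih =>
    intro i numbers h1 h2 hk
    rw [pvALoop, pvBLoop, pv_tetra_eq]
    by_cases hgt : ((pvTet i : Nat) : Int) > num
    · simp [hgt]
    · simp only [hgt, if_false]
      have e1 : ((pvTet i : Nat) : Int) + (((pvTri i : Nat) : Int) + ((i : Int) + 1)) = ((pvTet (i + 1) : Nat) : Int) := by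
        rw [pvTet_succ, pvTri_succ]; push_cast; ring
      have e2 : ((pvTri i : Nat) : Int) + ((i : Int) + 1) = ((pvTri (i + 1) : Nat) : Int) := by
        rw [pvTri_succ]; push_cast; ring
      have hrec := ih (i + 1) (numbers ++ [((pvTet i : Nat) : Int)])
        (by exact_mod_cast e1 ▸ (by omega : ((i:Nat)+1 : Int) ≤ ((pvTet i : Nat) : Int) + (((pvTri i : Nat) : Int) + ((i : Int) + 1))))
        (by positivity)
        (by push_cast at hk ⊢; omega)
      rw [hrec]
      congr 1 <;> push_cast [pvTet_succ, pvTri_succ] <;> ring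

-- ===== VERDICT (by name: the statement is the Claim_ definition above) =====
theorem make_tetradic_numbers_spec : Claim_equal_make_tetradic_numbers := by
  intro num _
  unfold Spec_make_tetradic_numbers make_tetradic_numbers make_tetradic_numbers_alt
  have h := pv_loop_eq num (num + 1 - (0 : Int)).toNat 0 []
    (by simp [pvTet]) (by simp [pvTri]) (by simp)
  simpa [pvTet, pvTri] using h
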